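-- pv_equiv track=rewrite | github.com/apachaves/the-wandering-mind | scripts/export_posts_markdown.py | extract_top_level_objects
-- ===== SOURCE A (Python) =====
-- def extract_top_level_objects(content: str, start_idx: int) -> list[str]:
--     """
--     Extract top-level object blocks from a TS array, handling template literals
--     (backtick strings) that may contain unbalanced braces.
--     """
--     blocks = []
--     i = start_idx
--     length = len(content)
--
--     while i < length:
--         c = content[i]
--
--         # Skip to the first {
--         if c == ']':
--             break
--
--         if c == '{':
--             # Start of an object
--             brace_depth = 1
--             block_start = i
--             i += 1
--
--             while i < length and brace_depth > 0:
--                 c = content[i]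
--
--                 if c == '`':
--                     # Skip template literal entirely
--                     i += 1
--                     while i < length:
--                         if content[i] == '\\':
--                             i += 2  # skip escaped char
--                             continue
--                         if content[i] == '`':
--                             i += 1
--                             break
--                         i += 1
--                     continue
--                 elif c == '"':
--                     # Skip double-quoted string
--                     i += 1
--                     while i < length:
--                         if content[i] == '\\':
--                             i += 2
--                             continue
--                         if content[i] == '"':
--                             i += 1
--                             break
--                         i += 1
--                     continue
--                 elif c == "'":
--                     # Skip single-quoted string
--                     i += 1
--                     while i < length:
--                         if content[i] == '\\':
--                             i += 2
--                             continue
--                         if content[i] == "'":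
--                             i += 1
--                             break
--                         i += 1
--                     continue
--                 elif c == '{':
--                     brace_depth += 1
--                 elif c == '}':
--                     brace_depth -= 1
--
--                 i += 1
--
--             block = content[block_start:i]
--             blocks.append(block)
--         else:
--             i += 1
--
--     return blocks
-- ===== SOURCE B (Python) =====
-- def extract_top_level_objects(content: str, start_idx: int) -> list[str]:
--     """Single flat scan with an explicit state machine instead of nested skip-loops."""
--     OUTSIDE, IN_OBJ, IN_STR = 0, 1, 2
--     blocks = []
--     state = OUTSIDE
--     quote = ''
--     depth = 0
--     block_start = 0
--     i = start_idx
--     length = len(content)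
--     while i < length:
--         c = content[i]
--         if state == OUTSIDE:
--             if c == ']':
--                 return blocks
--             if c == '{':
--                 state, depth, block_start = IN_OBJ, 1, i
--             i += 1
--         elif state == IN_OBJ:
--             if c == '{':
--                 depth += 1
--             elif c == '}':
--                 depth -= 1
--                 if depth == 0:
--                     blocks.append(content[block_start:i + 1])
--                     state = OUTSIDE
--             elif c in ('`', '"', "'"):
--                 state, quote = IN_STR, c
--             i += 1
--         else:  # IN_STR
--             if c == '\\':
--                 i += 2
--                 continue
--             if c == quote:
--                 state = IN_OBJ
--             i += 1
--     if state != OUTSIDE: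
--         blocks.append(content[block_start:i])
--     return blocks
-- ===== Notes on version B (the rewrite author's own statement) =====
-- stated objective: alternative
-- what changed: Replaced A's three-level nested skip-loops (outer scan, per-object brace loop, per-string-literal loop) by one flat while-loop over the characters driven by an explicit state variable (OUTSIDE/IN_OBJECT/IN_STRING) with a brace-depth counter and block-start index.
import Mathlib
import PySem

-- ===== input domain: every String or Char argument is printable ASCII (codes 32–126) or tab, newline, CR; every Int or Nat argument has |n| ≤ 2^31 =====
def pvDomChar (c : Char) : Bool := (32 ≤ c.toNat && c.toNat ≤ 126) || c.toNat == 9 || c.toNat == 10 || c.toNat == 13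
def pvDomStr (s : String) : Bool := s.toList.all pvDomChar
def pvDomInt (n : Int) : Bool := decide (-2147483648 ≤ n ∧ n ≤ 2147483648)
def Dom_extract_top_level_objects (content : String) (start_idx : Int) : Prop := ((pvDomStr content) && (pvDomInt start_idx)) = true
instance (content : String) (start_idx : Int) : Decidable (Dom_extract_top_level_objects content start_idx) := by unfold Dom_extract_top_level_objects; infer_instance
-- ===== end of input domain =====

-- One honest line: B replaces A's nested skip-loops by a single flat character scan with an
-- explicit state variable (outside / in-object / in-string) plus a brace-depth counter; same cost.
-- Every loop carries a Nat fuel that only guards totality: each iteration moves i forward by at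
-- least 1, so fuel (len - i).toNat at entry is never exhausted before the loop's own exit test.

-- ===== PORT A =====
-- inner `while` of A that skips a string/template literal delimited by q, starting at index i
def pvSkipStrA (cs : List Char) (q : Char) : Nat → Int → Int
  | 0, i => i
  | fuel + 1, i =>
    if i < (cs.length : Int) then
      match PySem.List.pyGet? cs i with
      | none => i        -- IndexError in Python; excluded by Pre_
      | some c =>
        if c = '\\' then pvSkipStrA cs q fuel (i + 2)
        else if c = q then i + 1
        else pvSkipStrA cs q fuel (i + 1)
    else i

-- the inner object `while` of A: returns the index where it stops
def pvObjLoopA (cs : List Char) : Nat → Int → Int → Int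
  | 0, i, _ => i
  | fuel + 1, i, depth =>
    if i < (cs.length : Int) ∧ 0 < depth then
      match PySem.List.pyGet? cs i with
      | none => i        -- IndexError in Python; excluded by Pre_
      | some c =>
        if c = '`' then pvObjLoopA cs fuel (pvSkipStrA cs '`' fuel (i + 1)) depth
        else if c = '"' then pvObjLoopA cs fuel (pvSkipStrA cs '"' fuel (i + 1)) depth
        else if c = '\'' then pvObjLoopA cs fuel (pvSkipStrA cs '\'' fuel (i + 1)) depth
        else if c = '{' then pvObjLoopA cs fuel (i + 1) (depth + 1)
        else if c = '}' then pvObjLoopA cs fuel (i + 1) (depth - 1)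
        else pvObjLoopA cs fuel (i + 1) depth
    else i

-- the outer `while` of A
def pvOuterA (cs : List Char) : Nat → Int → List String → List String
  | 0, _, blocks => blocks
  | fuel + 1, i, blocks =>
    if i < (cs.length : Int) then
      match PySem.List.pyGet? cs i with
      | none => blocks   -- IndexError in Python; excluded by Pre_
      | some c =>
        if c = ']' then blocks
        else if c = '{' then
          pvOuterA cs fuel (pvObjLoopA cs fuel (i + 1) 1)
            (blocks ++ [String.ofList (PySem.List.slice cs (some i) (some (pvObjLoopA cs fuel (i + 1) 1)))])
        else pvOuterA cs fuel (i + 1) blocks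
    else blocks

def extract_top_level_objects (content : String) (start_idx : Int) : List String :=
  pvOuterA content.toList (((content.toList.length : Int) - start_idx).toNat) start_idx []

-- ===== PORT B =====
inductive PvState
  | outside
  | inObject
  | inStr : Char → PvState
deriving DecidableEq, Repr

-- B: one flat loop; state machine over (state, depth, block_start)
def pvLoopB (cs : List Char) : Nat → Int → PvState → Int → Int → List String → List String
  | 0, i, st, _, bstart, blocks =>
    match st with
    | .outside => blocks
    | .inObject => blocks ++ [String.ofList (PySem.List.slice cs (some bstart) (some i))]
    | .inStr _ => blocks ++ [String.ofList (PySem.List.slice cs (some bstart) (some i))]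
  | fuel + 1, i, st, depth, bstart, blocks =>
    if i < (cs.length : Int) then
      match PySem.List.pyGet? cs i with
      | none => blocks   -- IndexError in Python; excluded by Pre_
      | some c =>
        match st with
        | .outside =>
          if c = ']' then blocks
          else if c = '{' then pvLoopB cs fuel (i + 1) .inObject 1 i blocks
          else pvLoopB cs fuel (i + 1) .outside depth bstart blocks
        | .inObject =>
          if c = '{' then pvLoopB cs fuel (i + 1) .inObject (depth + 1) bstart blocks
          else if c = '}' then
            if depth = 1 then
              pvLoopB cs fuel (i + 1) .outside 0 bstart
                (blocks ++ [String.ofList (PySem.List.slice cs (some bstart) (some (i + 1)))])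
            else pvLoopB cs fuel (i + 1) .inObject (depth - 1) bstart blocks
          else if c = '`' ∨ c = '"' ∨ c = '\'' then
            pvLoopB cs fuel (i + 1) (.inStr c) depth bstart blocks
          else pvLoopB cs fuel (i + 1) .inObject depth bstart blocks
        | .inStr q =>
          if c = '\\' then pvLoopB cs fuel (i + 2) (.inStr q) depth bstart blocks
          else if c = q then pvLoopB cs fuel (i + 1) .inObject depth bstart blocks
          else pvLoopB cs fuel (i + 1) (.inStr q) depth bstart blocks
    else
      match st with
      | .outside => blocks
      | .inObject => blocks ++ [String.ofList (PySem.List.slice cs (some bstart) (some i))]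
      | .inStr _ => blocks ++ [String.ofList (PySem.List.slice cs (some bstart) (some i))]

def extract_top_level_objects_alt (content : String) (start_idx : Int) : List String :=
  pvLoopB content.toList (((content.toList.length : Int) - start_idx).toNat) start_idx .outside 0 0 []

-- ===== PRECONDITION & SPEC =====
-- Pre_ excludes exactly the inputs where Python A raises IndexError: start_idx below -len(content)
-- makes the very first content[i] read fail (so it also excludes every negative start_idx on the
-- empty string); A returns normally on every other input.
def Pre_extract_top_level_objects (content : String) (start_idx : Int) : Prop :=
  -(content.toList.length : Int) ≤ start_idx
instance (content : String) (start_idx : Int) : Decidable (Pre_extract_top_level_objects content start_idx) := by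
  unfold Pre_extract_top_level_objects; infer_instance

def pvWitness_extract_top_level_objects : String × Int := ("[{}]", 0)

def Spec_extract_top_level_objects (content : String) (start_idx : Int) (out : List String) : Prop := out = extract_top_level_objects_alt content start_idx
instance (content : String) (start_idx : Int) (out : List String) : Decidable (Spec_extract_top_level_objects content start_idx out) := by unfold Spec_extract_top_level_objects; infer_instance

-- ===== CLAIM (what is proved, stated in full; the proofs are below) =====
def Claim_equal_extract_top_level_objects : Prop := ∀ (content : String) (start_idx : Int), Dom_extract_top_level_objects content start_idx → Pre_extract_top_level_objects content start_idx → Spec_extract_top_level_objects content start_idx (extract_top_level_objects content start_idx)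

-- ===== LEMMAS AND PROOFS =====

theorem pvSkipStrA_ge (cs : List Char) (q : Char) :
    ∀ (f : Nat) (i : Int), i ≤ pvSkipStrA cs q f i := by
  intro f
  induction f with
  | zero => intro i; simp [pvSkipStrA]
  | succ f ih =>
    intro i
    simp only [pvSkipStrA]
    split_ifs with h
    · cases hc : PySem.List.pyGet? cs i with
      | none => dsimp only; omega
      | some c =>
        dsimp only
        split_ifs with h1 h2
        · have := ih (i + 2); omega
        · omega
        · have := ih (i + 1); omega
    · omega

theorem pvObjLoopA_ge (cs : List Char) :
    ∀ (f : Nat) (i depth : Int), i ≤ pvObjLoopA cs f i depth := by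
  intro f
  induction f with
  | zero => intro i depth; simp [pvObjLoopA]
  | succ f ih =>
    intro i depth
    simp only [pvObjLoopA]
    split_ifs with h
    · cases hc : PySem.List.pyGet? cs i with
      | none => dsimp only; omega
      | some c =>
        dsimp only
        split_ifs with h1 h2 h3 h4 h5
        · have hs := pvSkipStrA_ge cs '`' f (i + 1)
          have := ih (pvSkipStrA cs '`' f (i + 1)) depth; omega
        · have hs := pvSkipStrA_ge cs '"' f (i + 1)
          have := ih (pvSkipStrA cs '"' f (i + 1)) depth; omega
        · have hs := pvSkipStrA_ge cs '\'' f (i + 1)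
          have := ih (pvSkipStrA cs '\'' f (i + 1)) depth; omega
        · have := ih (i + 1) (depth + 1); omega
        · have := ih (i + 1) (depth - 1); omega
        · have := ih (i + 1) depth; omega
    · omega

-- with enough fuel (at least the remaining distance to the end) the result does not depend on it
theorem pvSkipStrA_irrel (cs : List Char) (q : Char) :
    ∀ (f1 f2 : Nat) (i : Int), ((cs.length : Int) - i).toNat ≤ f1 →
      ((cs.length : Int) - i).toNat ≤ f2 → pvSkipStrA cs q f1 i = pvSkipStrA cs q f2 i := by
  intro f1
  induction f1 with
  | zero =>
    intro f2 i h1 h2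
    have h : ¬ i < (cs.length : Int) := by omega
    cases f2 <;> simp [pvSkipStrA, h]
  | succ f1 ih =>
    intro f2 i h1 h2
    by_cases h : i < (cs.length : Int)
    · obtain ⟨f2', rfl⟩ : ∃ f2', f2 = f2' + 1 := ⟨f2 - 1, by omega⟩
      simp only [pvSkipStrA, if_pos h]
      cases hc : PySem.List.pyGet? cs i with
      | none => rfl
      | some c =>
        dsimp only
        split_ifs with hb hq
        · exact ih f2' (i + 2) (by omega) (by omega)
        · rfl
        · exact ih f2' (i + 1) (by omega) (by omega)
    · cases f2 <;> simp [pvSkipStrA, h]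

theorem pvObjLoopA_irrel (cs : List Char) :
    ∀ (f1 f2 : Nat) (i depth : Int), ((cs.length : Int) - i).toNat ≤ f1 →
      ((cs.length : Int) - i).toNat ≤ f2 → pvObjLoopA cs f1 i depth = pvObjLoopA cs f2 i depth := by
  intro f1
  induction f1 with
  | zero =>
    intro f2 i depth h1 h2
    have h : ¬ (i < (cs.length : Int) ∧ 0 < depth) := by omega
    cases f2 <;> simp [pvObjLoopA, h]
  | succ f1 ih =>
    intro f2 i depth h1 h2
    by_cases h : i < (cs.length : Int) ∧ 0 < depth
    · obtain ⟨f2', rfl⟩ : ∃ f2', f2 = f2' + 1 := ⟨f2 - 1, by omega⟩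
      simp only [pvObjLoopA, if_pos h]
      cases hc : PySem.List.pyGet? cs i with
      | none => rfl
      | some c =>
        dsimp only
        split_ifs with h1' h2' h3' h4' h5'
        · have hs := pvSkipStrA_irrel cs '`' f1 f2' (i + 1) (by omega) (by omega)
          rw [← hs]
          have hg := pvSkipStrA_ge cs '`' f1 (i + 1)
          exact ih f2' (pvSkipStrA cs '`' f1 (i + 1)) depth (by omega) (by omega)
        · have hs := pvSkipStrA_irrel cs '"' f1 f2' (i + 1) (by omega) (by omega)
          rw [← hs]
          have hg := pvSkipStrA_ge cs '"' f1 (i + 1)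
          exact ih f2' (pvSkipStrA cs '"' f1 (i + 1)) depth (by omega) (by omega)
        · have hs := pvSkipStrA_irrel cs '\'' f1 f2' (i + 1) (by omega) (by omega)
          rw [← hs]
          have hg := pvSkipStrA_ge cs '\'' f1 (i + 1)
          exact ih f2' (pvSkipStrA cs '\'' f1 (i + 1)) depth (by omega) (by omega)
        · exact ih f2' (i + 1) (depth + 1) (by omega) (by omega)
        · exact ih f2' (i + 1) (depth - 1) (by omega) (by omega)
        · exact ih f2' (i + 1) depth (by omega) (by omega)
    · cases f2 <;> simp [pvObjLoopA, h]

theorem pvOuterA_irrel (cs : List Char) :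
    ∀ (f1 f2 : Nat) (i : Int) (blocks : List String), ((cs.length : Int) - i).toNat ≤ f1 →
      ((cs.length : Int) - i).toNat ≤ f2 → pvOuterA cs f1 i blocks = pvOuterA cs f2 i blocks := by
  intro f1
  induction f1 with
  | zero =>
    intro f2 i blocks h1 h2
    have h : ¬ i < (cs.length : Int) := by omega
    cases f2 <;> simp [pvOuterA, h]
  | succ f1 ih =>
    intro f2 i blocks h1 h2
    by_cases h : i < (cs.length : Int)
    · obtain ⟨f2', rfl⟩ : ∃ f2', f2 = f2' + 1 := ⟨f2 - 1, by omega⟩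
      simp only [pvOuterA, if_pos h]
      cases hc : PySem.List.pyGet? cs i with
      | none => rfl
      | some c =>
        dsimp only
        split_ifs with h1' h2'
        · rfl
        · have ho := pvObjLoopA_irrel cs f1 f2' (i + 1) 1 (by omega) (by omega)
          rw [← ho]
          have hg := pvObjLoopA_ge cs f1 (i + 1) 1
          exact ih f2' (pvObjLoopA cs f1 (i + 1) 1) _ (by omega) (by omega)
        · exact ih f2' (i + 1) blocks (by omega) (by omega)
    · cases f2 <;> simp [pvOuterA, h]

theorem pvLoopB_irrel (cs : List Char) :
    ∀ (f1 f2 : Nat) (i : Int) (st : PvState) (depth bstart : Int) (blocks : List String),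
      ((cs.length : Int) - i).toNat ≤ f1 → ((cs.length : Int) - i).toNat ≤ f2 →
      pvLoopB cs f1 i st depth bstart blocks = pvLoopB cs f2 i st depth bstart blocks := by
  intro f1
  induction f1 with
  | zero =>
    intro f2 i st depth bstart blocks h1 h2
    have h : ¬ i < (cs.length : Int) := by omega
    cases f2 <;> cases st <;> simp [pvLoopB, h]
  | succ f1 ih =>
    intro f2 i st depth bstart blocks h1 h2
    by_cases h : i < (cs.length : Int)
    · obtain ⟨f2', rfl⟩ : ∃ f2', f2 = f2' + 1 := ⟨f2 - 1, by omega⟩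
      simp only [pvLoopB, if_pos h]
      cases hc : PySem.List.pyGet? cs i with
      | none => rfl
      | some c =>
        cases st with
        | outside =>
          dsimp only
          split_ifs with h1' h2'
          · rfl
          · exact ih f2' (i + 1) .inObject 1 i blocks (by omega) (by omega)
          · exact ih f2' (i + 1) .outside depth bstart blocks (by omega) (by omega)
        | inObject =>
          dsimp only
          split_ifs with h1' h2' h3' h4'
          · exact ih f2' (i + 1) .inObject (depth + 1) bstart blocks (by omega) (by omega)
          · exact ih f2' (i + 1) .outside 0 bstart _ (by omega) (by omega)
          · exact ih f2' (i + 1) .inObject (depth - 1) bstart blocks (by omega) (by omega)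
          · exact ih f2' (i + 1) (.inStr c) depth bstart blocks (by omega) (by omega)
          · exact ih f2' (i + 1) .inObject depth bstart blocks (by omega) (by omega)
        | inStr q =>
          dsimp only
          split_ifs with h1' h2'
          · exact ih f2' (i + 2) (.inStr q) depth bstart blocks (by omega) (by omega)
          · exact ih f2' (i + 1) .inObject depth bstart blocks (by omega) (by omega)
          · exact ih f2' (i + 1) (.inStr q) depth bstart blocks (by omega) (by omega)
    · cases f2 <;> cases st <;> simp [pvLoopB, h]

-- A's object loop with non-positive depth stops immediately
theorem pvObjLoopA_nonpos (cs : List Char) (f : Nat) (i depth : Int) (hd : depth ≤ 0) :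
    pvObjLoopA cs f i depth = i := by
  cases f with
  | zero => simp [pvObjLoopA]
  | succ f =>
    have h : ¬ (i < (cs.length : Int) ∧ 0 < depth) := by omega
    simp [pvObjLoopA, h]

-- joint invariant: B's flat loop, run with the canonical fuel (len - i).toNat, equals in each of
-- its three states the corresponding position in A's nested loops (also at canonical fuel)
theorem pvMain (cs : List Char) : ∀ (n : Nat) (i : Int),
    ((cs.length : Int) - i).toNat ≤ n → -(cs.length : Int) ≤ i →
    (∀ depth bstart blocks,
      pvLoopB cs (((cs.length : Int) - i).toNat) i .outside depth bstart blocks =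
        pvOuterA cs (((cs.length : Int) - i).toNat) i blocks) ∧
    (∀ depth bstart blocks, 1 ≤ depth →
      pvLoopB cs (((cs.length : Int) - i).toNat) i .inObject depth bstart blocks =
        pvOuterA cs (((cs.length : Int) - i).toNat)
          (pvObjLoopA cs (((cs.length : Int) - i).toNat) i depth)
          (blocks ++ [String.ofList (PySem.List.slice cs (some bstart)
            (some (pvObjLoopA cs (((cs.length : Int) - i).toNat) i depth)))])) ∧
    (∀ q depth bstart blocks,
      pvLoopB cs (((cs.length : Int) - i).toNat) i (.inStr q) depth bstart blocks =
        pvLoopB cs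
          (((cs.length : Int) - pvSkipStrA cs q (((cs.length : Int) - i).toNat) i).toNat)
          (pvSkipStrA cs q (((cs.length : Int) - i).toNat) i) .inObject depth bstart blocks) := by
  intro n
  induction n with
  | zero =>
    intro i hn hge
    have hF : ((cs.length : Int) - i).toNat = 0 := by omega
    rw [hF]
    refine ⟨fun depth bstart blocks => rfl, fun depth bstart blocks hdep => ?_, fun q depth bstart blocks => ?_⟩
    · simp [pvLoopB, pvObjLoopA, pvOuterA]
    · simp [pvSkipStrA, hF, pvLoopB]
  | succ n ih =>
    intro i hn hge
    by_cases h : i < (cs.length : Int)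
    · -- one character is read; canonical fuel at i is one more than at i+1
      have hF : ((cs.length : Int) - i).toNat = ((cs.length : Int) - (i + 1)).toNat + 1 := by omega
      obtain ⟨c, hc⟩ : ∃ c, PySem.List.pyGet? cs i = some c := by
        cases hcc : PySem.List.pyGet? cs i with
        | none =>
          rw [PySem.List.pyGet?_eq_none_iff] at hcc
          exact absurd (by simp [PySem.Raise.InRange]; omega) hcc
        | some c => exact ⟨c, rfl⟩
      refine ⟨?_, ?_, ?_⟩
      · -- OUTSIDE state
        intro depth bstart blocks
        rw [hF]
        simp only [pvLoopB, pvOuterA, if_pos h, hc]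
        try dsimp only
        split_ifs with h1 h2
        · rfl
        · exact (ih (i + 1) (by omega) (by omega)).2.1 1 i blocks (by omega)
        · exact (ih (i + 1) (by omega) (by omega)).1 depth bstart blocks
      · -- IN_OBJECT state
        intro depth bstart blocks hdep
        rw [hF]
        have hcond : i < (cs.length : Int) ∧ 0 < depth := ⟨h, by omega⟩
        have hquote : ∀ q : Char,
            pvLoopB cs (((cs.length : Int) - (i + 1)).toNat) (i + 1) (.inStr q) depth bstart blocks =
              pvOuterA cs (((cs.length : Int) - (i + 1)).toNat + 1)
                (pvObjLoopA cs (((cs.length : Int) - (i + 1)).toNat)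
                  (pvSkipStrA cs q (((cs.length : Int) - (i + 1)).toNat) (i + 1)) depth)
                (blocks ++ [String.ofList (PySem.List.slice cs (some bstart)
                  (some (pvObjLoopA cs (((cs.length : Int) - (i + 1)).toNat)
                    (pvSkipStrA cs q (((cs.length : Int) - (i + 1)).toNat) (i + 1)) depth)))]) := by
          intro q
          have hskip := pvSkipStrA_ge cs q (((cs.length : Int) - (i + 1)).toNat) (i + 1)
          set sk := pvSkipStrA cs q (((cs.length : Int) - (i + 1)).toNat) (i + 1) with hsk
          rw [(ih (i + 1) (by omega) (by omega)).2.2 q depth bstart blocks, ← hsk]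
          rw [(ih sk (by omega) (by omega)).2.1 depth bstart blocks (by omega)]
          have hog := pvObjLoopA_ge cs (((cs.length : Int) - sk).toNat) sk depth
          rw [pvObjLoopA_irrel cs (((cs.length : Int) - sk).toNat)
            (((cs.length : Int) - (i + 1)).toNat) sk depth (by omega) (by omega)]
          have hog2 := pvObjLoopA_ge cs (((cs.length : Int) - (i + 1)).toNat) sk depth
          exact pvOuterA_irrel cs _ _ _ _ (by omega) (by omega)
        simp only [pvLoopB, if_pos h, hc]
        try dsimp only
        split_ifs with h1 h2 h3 h4
        · -- c = '{' : depth increases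
          subst h1
          simp only [pvObjLoopA, if_pos hcond, hc, Char.reduceEq, reduceIte]
          try dsimp only
          rw [(ih (i + 1) (by omega) (by omega)).2.1 (depth + 1) bstart blocks (by omega)]
          have hg := pvObjLoopA_ge cs (((cs.length : Int) - (i + 1)).toNat) (i + 1) (depth + 1)
          exact pvOuterA_irrel cs _ _ _ _ (by omega) (by omega)
        · -- c = '}' , depth = 1 : block closes
          subst h2; subst h3
          simp only [pvObjLoopA, if_pos hcond, hc, Char.reduceEq, reduceIte]
          try dsimp only
          rw [pvObjLoopA_nonpos cs _ (i + 1) (1 - 1 : Int) (by omega)]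
          rw [(ih (i + 1) (by omega) (by omega)).1 0 bstart
            (blocks ++ [String.ofList (PySem.List.slice cs (some bstart) (some (i + 1)))])]
          exact pvOuterA_irrel cs _ _ _ _ (by omega) (by omega)
        · -- c = '}' , depth > 1 : depth decreases
          subst h2
          simp only [pvObjLoopA, if_pos hcond, hc, Char.reduceEq, reduceIte]
          try dsimp only
          rw [(ih (i + 1) (by omega) (by omega)).2.1 (depth - 1) bstart blocks (by omega)]
          have hg := pvObjLoopA_ge cs (((cs.length : Int) - (i + 1)).toNat) (i + 1) (depth - 1)
          exact pvOuterA_irrel cs _ _ _ _ (by omega) (by omega)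
        · -- c is a quote character: enter the string state
          rcases h4 with hq | hq | hq <;> subst hq <;>
            simp only [pvObjLoopA, if_pos hcond, hc, Char.reduceEq, reduceIte] <;>
            exact hquote _
        · -- ordinary character inside the object
          push Not at h4
          obtain ⟨hq1, hq2, hq3⟩ := h4
          simp only [pvObjLoopA, if_pos hcond, hc, if_neg hq1, if_neg hq2, if_neg hq3,
            if_neg h1, if_neg h2]
          try dsimp only
          rw [(ih (i + 1) (by omega) (by omega)).2.1 depth bstart blocks (by omega)]
          have hg := pvObjLoopA_ge cs (((cs.length : Int) - (i + 1)).toNat) (i + 1) depth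
          exact pvOuterA_irrel cs _ _ _ _ (by omega) (by omega)
      · -- IN_STRING state
        intro q depth bstart blocks
        rw [hF]
        simp only [pvLoopB, pvSkipStrA, if_pos h, hc]
        try dsimp only
        split_ifs with h1 h2
        · -- escape: skip two characters
          subst h1
          rw [pvLoopB_irrel cs (((cs.length : Int) - (i + 1)).toNat)
            (((cs.length : Int) - (i + 2)).toNat) (i + 2) (.inStr q) depth bstart blocks
            (by omega) (by omega)]
          rw [(ih (i + 2) (by omega) (by omega)).2.2 q depth bstart blocks]
          have hg := pvSkipStrA_ge cs q (((cs.length : Int) - (i + 2)).toNat) (i + 2)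
          rw [pvSkipStrA_irrel cs q (((cs.length : Int) - (i + 2)).toNat)
            (((cs.length : Int) - (i + 1)).toNat) (i + 2) (by omega) (by omega)]
        · -- closing quote
          subst h2
          rfl
        · -- ordinary character inside the string
          rw [(ih (i + 1) (by omega) (by omega)).2.2 q depth bstart blocks]
    · -- i ran off the end: canonical fuel is 0
      have hF : ((cs.length : Int) - i).toNat = 0 := by omega
      rw [hF]
      refine ⟨fun depth bstart blocks => rfl, fun depth bstart blocks hdep => ?_, fun q depth bstart blocks => ?_⟩
      · simp [pvLoopB, pvObjLoopA, pvOuterA]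
      · simp [pvSkipStrA, hF, pvLoopB]

-- ===== VERDICT (by name: the statement is the Claim_ definition above) =====
theorem extract_top_level_objects_spec : Claim_equal_extract_top_level_objects := by
  intro content start_idx _hDom hPre
  unfold Spec_extract_top_level_objects extract_top_level_objects extract_top_level_objects_alt
  exact ((pvMain content.toList (((content.toList.length : Int) - start_idx).toNat) start_idx
    le_rfl hPre).1 0 0 []).symm
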